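-- pv_equiv track=rewrite | github.com/labdeeman7/cholec_instance_seg | utils/convert_pkl_to_labelme.py | get_class_id_instance_id
-- ===== SOURCE A (Python) =====
-- def get_class_id_instance_id(input_list):
--     id_counts = {}
--     result = []
--
--     for i, id in enumerate(input_list):
--         if id in id_counts:
--             id_counts[id] += 1
--         else:
--             id_counts[id] = 1
--         result.append([id, id_counts[id]])
--
--     return result
-- ===== SOURCE B (Python) =====
-- def get_class_id_instance_id(input_list):
--     # Group-then-scatter: first collect, per value, the list of positions where
--     # it occurs; then write [value, occurrence_number] back into a result array
--     # at those positions. No running counter is ever maintained.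
--     positions = {}
--     for i, v in enumerate(input_list):
--         positions.setdefault(v, []).append(i)
--     result = [None] * len(input_list)
--     for v, idxs in positions.items():
--         for occ, idx in enumerate(idxs, 1):
--             result[idx] = [v, occ]
--     return result
-- ===== Notes on version B (the rewrite author's own statement) =====
-- stated objective: alternative
-- what changed: Replaces the single forward pass that maintains a dict of running counts with a two-phase group-then-scatter: first build per-value position lists, then write [value, occurrence_number] back into a preallocated result array at those positions; no running counter exists.
import Mathlib
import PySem

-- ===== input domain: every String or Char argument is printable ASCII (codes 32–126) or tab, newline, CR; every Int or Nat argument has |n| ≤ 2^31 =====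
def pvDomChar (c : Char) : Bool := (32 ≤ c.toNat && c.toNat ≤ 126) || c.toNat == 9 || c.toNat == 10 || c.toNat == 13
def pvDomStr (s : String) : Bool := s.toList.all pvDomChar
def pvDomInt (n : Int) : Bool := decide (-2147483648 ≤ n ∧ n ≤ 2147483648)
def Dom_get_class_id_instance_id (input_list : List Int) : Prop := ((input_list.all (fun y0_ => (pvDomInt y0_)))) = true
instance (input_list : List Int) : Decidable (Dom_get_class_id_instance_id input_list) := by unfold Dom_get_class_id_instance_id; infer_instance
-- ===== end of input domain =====

-- B replaces A's single forward pass maintaining a dict of running counts by a two-phase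
-- group-then-scatter: build per-value position lists, then write [value, occurrence_number]
-- back into a preallocated result array at those positions (alternative algorithm, same cost).

-- ===== PORT A =====
-- dict of running counts, result accumulated while folding over enumerate(input_list)
def get_class_id_instance_id (input_list : List Int) : List (List Int) :=
  let st := (PySem.List.enumerate input_list 0).foldl
    (fun (st : PySem.Dict Int Int × List (List Int)) p =>
      let d := if st.1.contains p.2 then st.1.modify p.2 0 (· + 1) else st.1.insert p.2 1
      (d, st.2 ++ [[p.2, d.getD p.2 0]]))
    (PySem.Dict.empty, [])
  st.2

-- ===== PORT B =====
-- phase 1: positions[v] = list of indices where v occurs (setdefault+append = Dict.modify with []);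
--   the enumerate index is ≥ 0, so '.toNat' is exact here.
-- phase 2: result = [None]*n, then result[idx] = [v, occ] for each group; every index produced by
--   phase 1 is < n, so List.set (a no-op out of range) and the final '.getD []' (cells are all
--   assigned, so the default is never used) are exact.
def get_class_id_instance_id_alt (input_list : List Int) : List (List Int) :=
  let positions := (PySem.List.enumerate input_list 0).foldl
    (fun (d : PySem.Dict Int (List Nat)) p => d.modify p.2 [] (· ++ [p.1.toNat]))
    PySem.Dict.empty
  let result := positions.items.foldl
    (fun (res : List (Option (List Int))) vp =>
      (PySem.List.enumerate vp.2 1).foldl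
        (fun res q => res.set q.2 (some [vp.1, q.1])) res)
    (List.replicate input_list.length (none : Option (List Int)))
  result.map (fun o => o.getD [])

-- ===== PRECONDITION & SPEC =====
def Spec_get_class_id_instance_id (input_list : List Int) (out : List (List Int)) : Prop := out = get_class_id_instance_id_alt input_list
instance (input_list : List Int) (out : List (List Int)) : Decidable (Spec_get_class_id_instance_id input_list out) := by unfold Spec_get_class_id_instance_id; infer_instance

-- ===== CLAIM (what is proved, stated in full; the proofs are below) =====
def Claim_equal_get_class_id_instance_id : Prop := ∀ (input_list : List Int), Dom_get_class_id_instance_id input_list → Spec_get_class_id_instance_id input_list (get_class_id_instance_id input_list)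

-- ===== LEMMAS AND PROOFS =====

-- A's branch ('seen before? bump : start at 1') is exactly Counter's step
lemma stepA_eq_modify (d : PySem.Dict Int Int) (x : Int) :
    (if d.contains x then d.modify x 0 (· + 1) else d.insert x 1) = d.modify x 0 (· + 1) := by
  unfold PySem.Dict.modify
  by_cases h : d.contains x
  · simp [h]
  · have h2 : d.get? x = none := by
      rw [PySem.Dict.get?_eq_none_iff_contains]; simpa using h
    simp [h, PySem.Dict.getD, h2]

-- the common specification: entry i is [xs[i], count of xs[i] in xs[:i+1]]
def specB (xs : List Int) : List (List Int) :=
  (PySem.List.enumerate xs 0).map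
    (fun p => [p.2, ((PySem.List.slice xs none (some (p.1 + 1))).count p.2 : Int)])

lemma specB_length (xs : List Int) : (specB xs).length = xs.length := by
  simp [specB, PySem.List.length_enumerate]

lemma specB_getElem (xs : List Int) (k : Nat) (hk : k < xs.length) :
    (specB xs)[k]'(by rw [specB_length]; exact hk)
      = [xs[k], (((xs.take (k + 1)).count xs[k] : Nat) : Int)] := by
  unfold specB
  rw [List.getElem_map]
  rw [PySem.List.getElem_enumerate]
  have h1 : (0 + (k : Int)) + 1 = ((k + 1 : Nat) : Int) := by push_cast; ring
  rw [h1, PySem.List.slice_to_natCast]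

lemma specB_append (xs : List Int) (x : Int) :
    specB (xs ++ [x]) = specB xs ++ [[x, ((xs.count x : Int) + 1)]] := by
  unfold specB
  rw [PySem.List.enumerate_append, List.map_append]
  congr 1
  · apply List.map_congr_left
    intro p hp
    rw [PySem.List.mem_enumerate_iff] at hp
    obtain ⟨k, hk, rfl⟩ := hp
    have h1 : (0 + (k : Int)) + 1 = ((k + 1 : Nat) : Int) := by push_cast; ring
    rw [h1, PySem.List.slice_to_natCast, PySem.List.slice_to_natCast,
        List.take_append_of_le_length (by omega)]
  · have h1 : (0 + (xs.length : Int)) + 1 = ((xs.length + 1 : Nat) : Int) := by push_cast; ring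
    simp only [PySem.List.enumerate, List.map_cons, List.map_nil, List.cons.injEq, and_true,
      true_and]
    rw [h1, PySem.List.slice_to_natCast]
    simp [List.take_append, List.count_append,
      List.take_of_length_le (le_of_lt (Nat.lt_succ_self xs.length))]

-- A's fold maintains (Counter of processed prefix, specB of processed prefix)
lemma stateA_eq (xs : List Int) :
    (PySem.List.enumerate xs 0).foldl
      (fun (st : PySem.Dict Int Int × List (List Int)) p =>
        let d := if st.1.contains p.2 then st.1.modify p.2 0 (· + 1) else st.1.insert p.2 1
        (d, st.2 ++ [[p.2, d.getD p.2 0]]))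
      (PySem.Dict.empty, [])
    = (PySem.Dict.counter xs, specB xs) := by
  induction xs using List.reverseRecOn with
  | nil => simp [specB, PySem.List.enumerate, PySem.Dict.counter]
  | append_singleton xs x ih =>
    rw [PySem.List.enumerate_append, List.foldl_append, ih]
    show ((PySem.List.enumerate [x] (0 + xs.length)).foldl _ _) = _
    simp only [PySem.List.enumerate, List.foldl_cons, List.foldl_nil]
    rw [stepA_eq_modify, ← PySem.Dict.counter_append_singleton]
    refine Prod.ext rfl ?_
    show specB xs ++ [[x, (PySem.Dict.counter (xs ++ [x])).getD x 0]] = specB (xs ++ [x])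
    rw [PySem.Dict.getD_counter, specB_append]
    simp [List.count_append]

-- ---------- B side ----------

-- the per-value position lists (what B's phase-1 dict stores)
def idxsOf (xs : List Int) (v : Int) : List Nat :=
  ((((PySem.List.enumerate xs 0).map (fun p => (p.2, p.1.toNat))).filter
      (fun q => q.1 == v)).map (·.2))

def posDict (xs : List Int) : PySem.Dict Int (List Nat) :=
  (PySem.List.enumerate xs 0).foldl
    (fun (d : PySem.Dict Int (List Nat)) p => d.modify p.2 [] (· ++ [p.1.toNat]))
    PySem.Dict.empty

lemma posDict_append (xs : List Int) (x : Int) :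
    posDict (xs ++ [x]) = (posDict xs).modify x [] (· ++ [xs.length]) := by
  unfold posDict
  rw [PySem.List.enumerate_append, List.foldl_append]
  simp [PySem.List.enumerate]

lemma posDict_keys (xs : List Int) : (posDict xs).keys = PySem.Set.ofList xs := by
  unfold posDict
  rw [PySem.Dict.keys_foldl_modify_key]
  rw [PySem.List.map_snd_enumerate, PySem.Dict.keys_empty, PySem.Set.update_nil_left]

lemma posDict_nodup_keys (xs : List Int) : (posDict xs).keys.Nodup := by
  rw [posDict_keys]; exact PySem.Set.nodup_ofList xs

lemma idxsOf_append (xs : List Int) (x v : Int) :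
    idxsOf (xs ++ [x]) v = idxsOf xs v ++ (if x = v then [xs.length] else []) := by
  unfold idxsOf
  rw [PySem.List.enumerate_append, List.map_append, List.filter_append, List.map_append]
  congr 1
  simp only [PySem.List.enumerate, List.map_cons, List.map_nil, List.filter_cons,
    List.filter_nil]
  by_cases h : x = v
  · simp [h]
  · have hb : (x == v) = false := beq_eq_false_iff_ne.mpr h
    simp [hb, h]

-- phase-1 dict lookup is exactly the per-value position list
lemma posDict_getD (xs : List Int) (v : Int) :
    (posDict xs).getD v [] = idxsOf xs v := by
  induction xs using List.reverseRecOn with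
  | nil => rfl
  | append_singleton xs x ih =>
    rw [posDict_append, PySem.Dict.getD_modify, idxsOf_append]
    by_cases h : v = x
    · subst h
      simp [ih]
    · have h' : ¬ x = v := fun hh => h hh.symm
      simp [h, h', ih]

lemma posDict_items (xs : List Int) :
    (posDict xs).items = (PySem.Set.ofList xs).map (fun v => (v, idxsOf xs v)) := by
  rw [PySem.Dict.items_eq_map_keys (posDict xs) (posDict_nodup_keys xs) []]
  rw [posDict_keys]
  exact List.map_congr_left (fun v _ => by rw [posDict_getD])

-- recursion equation for idxsOf (append on the right)
lemma idxsOf_nil (v : Int) : idxsOf [] v = [] := rfl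

lemma length_idxsOf (xs : List Int) (v : Int) :
    (idxsOf xs v).length = xs.count v := by
  induction xs using List.reverseRecOn with
  | nil => rfl
  | append_singleton xs x ih =>
    rw [idxsOf_append, List.length_append, ih, List.count_append]
    by_cases h : x = v <;> simp [h, beq_iff_eq, Ne.symm]

lemma mem_idxsOf (xs : List Int) (v : Int) (k : Nat) (hk : k ∈ idxsOf xs v) :
    k < xs.length ∧ xs[k]? = some v := by
  induction xs using List.reverseRecOn with
  | nil => simp [idxsOf_nil] at hk
  | append_singleton xs x ih =>
    rw [idxsOf_append, List.mem_append] at hk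
    rcases hk with h | h
    · obtain ⟨h1, h2⟩ := ih h
      refine ⟨by simp; omega, ?_⟩
      rw [List.getElem?_append_left h1]; exact h2
    · by_cases hx : x = v
      · simp [hx] at h
        subst h
        refine ⟨by simp, ?_⟩
        rw [List.getElem?_append_right (le_refl _)]
        simpa using hx
      · simp [hx] at h

lemma nodup_idxsOf (xs : List Int) (v : Int) : (idxsOf xs v).Nodup := by
  induction xs using List.reverseRecOn with
  | nil => simp [idxsOf_nil]
  | append_singleton xs x ih =>
    rw [idxsOf_append]
    by_cases h : x = v
    · simp only [h, if_pos rfl]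
      refine List.Nodup.append ih (List.nodup_singleton _) ?_
      intro k hk hk'
      simp at hk'
      subst hk'
      exact absurd (mem_idxsOf xs v _ hk).1 (lt_irrefl _)
    · simp [h, ih]

-- the central positional fact: within its group, index k sits at list position count(xs[:k], v)
lemma idxsOf_getElem? (xs : List Int) (k : Nat) (hk : k < xs.length) :
    (idxsOf xs (xs[k]))[(xs.take k).count xs[k]]? = some k := by
  induction xs using List.reverseRecOn with
  | nil => simp at hk
  | append_singleton xs x ih =>
    rcases Nat.lt_or_ge k xs.length with h | h
    · have hget : (xs ++ [x])[k] = xs[k] := List.getElem_append_left h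
      rw [hget, idxsOf_append, List.take_append_of_le_length (le_of_lt h)]
      rw [List.getElem?_append_left]
      · exact ih h
      · rw [length_idxsOf]
        calc (xs.take k).count xs[k]
            < (xs.take k).count xs[k] + (xs.drop k).count xs[k] := by
              have : 0 < (xs.drop k).count xs[k] := by
                apply List.count_pos_iff.mpr
                exact List.mem_iff_getElem.mpr ⟨0, by simp [h], by simp [h]⟩
              omega
          _ = xs.count xs[k] := by rw [← List.count_append, List.take_append_drop]
    · have hk' : k = xs.length := by simp at hk; omega
      subst hk'
      have hget : (xs ++ [x])[xs.length] = x := by simp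
      rw [hget, idxsOf_append, if_pos rfl]
      rw [List.take_append_of_le_length (le_refl _), List.take_length]
      rw [List.getElem?_append_right (by rw [length_idxsOf])]
      rw [length_idxsOf]
      simp

-- ----- the scatter (phase 2) as a flat list of writes -----

def writesOf (xs : List Int) : List (Nat × List Int) :=
  ((PySem.Set.ofList xs).map (fun v => (v, idxsOf xs v))).flatMap
    (fun vp => (PySem.List.enumerate vp.2 1).map (fun q => (q.2, [vp.1, q.1])))

-- nested fold over groups = single fold over the flattened write list
lemma foldl_foldl_flatMap {α β γ : Type} (l : List α) (g : α → List β) (f : γ → β → γ)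
    (init : γ) :
    l.foldl (fun c a => (g a).foldl f c) init = (l.flatMap g).foldl f init := by
  induction l generalizing init with
  | nil => rfl
  | cons a l ih => simp [List.flatMap_cons, List.foldl_append, ih]

lemma scatter_length {α : Type} (ws : List (Nat × α)) (R : List (Option α)) :
    (ws.foldl (fun r w => r.set w.1 (some w.2)) R).length = R.length := by
  induction ws generalizing R with
  | nil => rfl
  | cons w ws ih => simp [ih, List.length_set]

lemma scatter_not_mem {α : Type} (ws : List (Nat × α)) (R : List (Option α)) (k : Nat)
    (h : k ∉ ws.map (·.1)) :
    (ws.foldl (fun r w => r.set w.1 (some w.2)) R)[k]? = R[k]? := by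
  induction ws generalizing R with
  | nil => rfl
  | cons w ws ih =>
    simp only [List.map_cons, List.mem_cons, not_or] at h
    rw [List.foldl_cons, ih _ h.2, List.getElem?_set_ne (fun he => h.1 he.symm)]

lemma scatter_mem {α : Type} (ws : List (Nat × α)) (R : List (Option α)) (k : Nat) (val : α)
    (hnd : (ws.map (·.1)).Nodup) (hmem : (k, val) ∈ ws) (hk : k < R.length) :
    (ws.foldl (fun r w => r.set w.1 (some w.2)) R)[k]? = some (some val) := by
  induction ws generalizing R with
  | nil => simp at hmem
  | cons w ws ih =>
    simp only [List.map_cons, List.nodup_cons] at hnd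
    rcases List.mem_cons.mp hmem with h | h
    · subst h
      rw [List.foldl_cons, scatter_not_mem _ _ _ (by simpa using hnd.1)]
      rw [List.getElem?_set_self (by simpa using hk)]
    · have hne : w.1 ≠ k := by
        intro he
        exact hnd.1 (by simpa [he] using (List.mem_map_of_mem (f := (·.1)) h))
      rw [List.foldl_cons]
      exact ih _ hnd.2 h (by simpa using hk)

-- write keys: flatten back to the groups themselves
lemma writesOf_keys (xs : List Int) :
    (writesOf xs).map (·.1) = (PySem.Set.ofList xs).flatMap (fun v => idxsOf xs v) := by
  unfold writesOf
  rw [List.map_flatMap, List.flatMap_map]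
  congr 1
  funext v
  rw [List.map_map]
  exact PySem.List.map_snd_enumerate _ _

lemma writesOf_keys_nodup (xs : List Int) : ((writesOf xs).map (·.1)).Nodup := by
  rw [writesOf_keys, List.nodup_flatMap]
  refine ⟨fun v _ => nodup_idxsOf xs v, ?_⟩
  refine (PySem.Set.nodup_ofList (xs := xs)).imp ?_
  intro v w hvw
  intro k hkv hkw
  apply hvw
  have h1 := (mem_idxsOf xs v k hkv).2
  have h2 := (mem_idxsOf xs w k hkw).2
  rw [h1] at h2
  exact Option.some_inj.mp h2

lemma writesOf_mem (xs : List Int) (k : Nat) (hk : k < xs.length) :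
    (k, [xs[k], (((xs.take (k + 1)).count xs[k] : Nat) : Int)]) ∈ writesOf xs := by
  unfold writesOf
  rw [List.mem_flatMap]
  refine ⟨(xs[k], idxsOf xs xs[k]), ?_, ?_⟩
  · exact List.mem_map_of_mem ((PySem.Set.mem_ofList _ _).mpr (xs.getElem_mem hk))
  · rw [List.mem_map]
    set m := (xs.take k).count xs[k] with hm
    have hg : (idxsOf xs xs[k])[m]? = some k := idxsOf_getElem? xs k hk
    have hmlt : m < (idxsOf xs xs[k]).length := (List.getElem?_eq_some_iff.mp hg).1
    refine ⟨((1 : Int) + m, k), ?_, ?_⟩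
    · rw [PySem.List.mem_enumerate_iff]
      exact ⟨m, hmlt, by
        have := (List.getElem?_eq_some_iff.mp hg).2
        simp [this]⟩
    · have hcount : (xs.take (k + 1)).count xs[k] = m + 1 := by
        rw [hm, List.take_succ, List.count_append]
        simp [List.getElem?_eq_getElem hk]
      have hc2 : ((((xs.take (k + 1)).count xs[k] : Nat)) : Int) = 1 + (m : Int) := by
        rw [hcount]; push_cast; ring
      simp [hc2]

-- B's port equals specB
lemma alt_eq_specB (xs : List Int) : get_class_id_instance_id_alt xs = specB xs := by
  show ((posDict xs).items.foldl
      (fun (res : List (Option (List Int))) vp =>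
        (PySem.List.enumerate vp.2 1).foldl
          (fun res q => res.set q.2 (some [vp.1, q.1])) res)
      (List.replicate xs.length (none : Option (List Int)))).map (fun o => o.getD [])
    = specB xs
  have hstep : ∀ (res : List (Option (List Int))) (vp : Int × List Nat),
      (PySem.List.enumerate vp.2 1).foldl
        (fun res q => res.set q.2 (some [vp.1, q.1])) res
      = ((PySem.List.enumerate vp.2 1).map (fun q => (q.2, [vp.1, q.1]))).foldl
          (fun r (w : Nat × List Int) => r.set w.1 (some w.2)) res := by
    intro res vp
    rw [List.foldl_map]
  have hscatter :
      ((posDict xs).items.foldl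
        (fun (res : List (Option (List Int))) vp =>
          (PySem.List.enumerate vp.2 1).foldl
            (fun res q => res.set q.2 (some [vp.1, q.1])) res)
        (List.replicate xs.length (none : Option (List Int))))
      = (writesOf xs).foldl (fun r (w : Nat × List Int) => r.set w.1 (some w.2))
          (List.replicate xs.length (none : Option (List Int))) := by
    rw [posDict_items]
    unfold writesOf
    have hfun : (fun (res : List (Option (List Int))) (vp : Int × List Nat) =>
        (PySem.List.enumerate vp.2 1).foldl
          (fun res q => res.set q.2 (some [vp.1, q.1])) res)
      = (fun (res : List (Option (List Int))) (vp : Int × List Nat) =>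
          ((PySem.List.enumerate vp.2 1).map (fun q => (q.2, [vp.1, q.1]))).foldl
            (fun r (w : Nat × List Int) => r.set w.1 (some w.2)) res) := by
      funext res vp
      exact hstep res vp
    rw [hfun, foldl_foldl_flatMap]
  rw [hscatter]
  apply List.ext_getElem?
  intro k
  rcases Nat.lt_or_ge k xs.length with hk | hk
  · have hlen : k < ((writesOf xs).foldl
        (fun r (w : Nat × List Int) => r.set w.1 (some w.2))
        (List.replicate xs.length (none : Option (List Int)))).length := by
      rw [scatter_length, List.length_replicate]; exact hk
    rw [List.getElem?_map]
    rw [scatter_mem (writesOf xs) _ k _ (writesOf_keys_nodup xs) (writesOf_mem xs k hk)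
        (by rw [List.length_replicate]; exact hk)]
    rw [List.getElem?_eq_getElem (by rw [specB_length]; exact hk)]
    rw [specB_getElem xs k hk]
    rfl
  · rw [List.getElem?_eq_none, List.getElem?_eq_none]
    · rw [specB_length]; exact hk
    · rw [List.length_map, scatter_length, List.length_replicate]; exact hk

-- ===== VERDICT (by name: the statement is the Claim_ definition above) =====
theorem get_class_id_instance_id_spec : Claim_equal_get_class_id_instance_id := by
  intro xs _
  unfold Spec_get_class_id_instance_id
  rw [alt_eq_specB]
  show ((PySem.List.enumerate xs 0).foldl _ (PySem.Dict.empty, [])).2 = specB xs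
  rw [stateA_eq]
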